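-- pv_equiv track=rewrite | github.com/benquick123/code-profiling | code/batch-1/vse-naloge-brez-testov/DN7-M-27.py | preberi_pot
-- ===== SOURCE A (Python) =====
-- def preberi_pot(ukazi):
--     """
--     Za podani seznam ukazov (glej navodila naloge) vrni pot.
--
--     Args:
--         ukazi (str): ukazi, napisani po vrsticah
--
--     Returns:
--         list of tuple of int: pot
--     """
--     pot = [(0, 0)]
--     koordinate = [0, 0]
--     smer = 0
--     # 0 = GOR
--     # 1 = DESNO
--     # 2 = DOL
--     # 3 = LEVO
--
--     for ukaz in ukazi.splitlines():
--         if not ukaz.isnumeric():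
--             if ukaz == "DESNO":
--                 smer += 1
--             elif ukaz == "LEVO":
--                 smer -= 1
--             if smer > 3:
--                 smer = 0
--             if smer < 0:
--                 smer = 3
--         else:
--             st = int(ukaz)
--             if smer == 0:
--                 koordinate[1] -= st
--             elif smer == 1:
--                 koordinate[0] += st
--             elif smer == 2:
--                 koordinate[1] += st
--             elif smer == 3:
--                 koordinate[0] -= st
--             pot.append(tuple(koordinate))
--     return pot
-- ===== SOURCE B (Python) =====
-- def preberi_pot(ukazi):
--     """
--     Za podani seznam ukazov (glej navodila naloge) vrni pot.
--
--     Args: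
--         ukazi (str): ukazi, napisani po vrsticah
--
--     Returns:
--         list of tuple of int: pot
--     """
--     # stage 1: tokenize — keep only moves, each tagged with the heading index at that point
--     TURN = {"DESNO": 1, "LEVO": -1}
--     moves = []
--     h = 0
--     for ukaz in ukazi.splitlines():
--         if ukaz.isnumeric():
--             moves.append((h % 4, int(ukaz)))
--         else:
--             h += TURN.get(ukaz, 0)
--     # stage 2: map each move to a displacement vector
--     DIRS = [(0, -1), (1, 0), (0, 1), (-1, 0)]
--     disps = [(st * DIRS[d][0], st * DIRS[d][1]) for d, st in moves]
--     # stage 3: prefix-sum the displacements from the origin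
--     pot = [(0, 0)]
--     for dx, dy in disps:
--         px, py = pot[-1]
--         pot.append((px + dx, py + dy))
--     return pot
-- ===== Notes on version B (the rewrite author's own statement) =====
-- stated objective: alternative
-- what changed: B replaces A's single simulation loop (position + wrap-around direction index updated together, four-way delta branch) by three staged passes: tokenize the numeric lines into (heading mod 4, amount) pairs using a turn lookup table, map each pair to a displacement vector via a direction table, then prefix-sum the displacements from the origin.
import Mathlib
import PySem

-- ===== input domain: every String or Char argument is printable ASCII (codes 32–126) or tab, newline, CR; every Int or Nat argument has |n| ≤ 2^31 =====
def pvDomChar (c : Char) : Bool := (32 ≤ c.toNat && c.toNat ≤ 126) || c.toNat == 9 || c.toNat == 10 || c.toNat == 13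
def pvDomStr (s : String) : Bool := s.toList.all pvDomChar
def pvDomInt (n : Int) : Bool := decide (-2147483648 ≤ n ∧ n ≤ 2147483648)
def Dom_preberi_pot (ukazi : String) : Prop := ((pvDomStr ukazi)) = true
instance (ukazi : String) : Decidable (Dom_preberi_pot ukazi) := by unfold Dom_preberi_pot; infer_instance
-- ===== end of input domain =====

-- B replaces A's single simulation loop by three staged passes (tokenize moves with their
-- heading, map to displacement vectors, prefix-sum): a plainer, table-driven decomposition.


-- ===== PORT A =====
-- ukaz.isnumeric() is ported as PySem.Str.strIsdigit (exact on the printable-ASCII domain,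
-- where isnumeric and isdigit coincide); int(ukaz) as (PySem.Int.ofStr? ukaz).getD 0, which is
-- exact here since the isnumeric guard guarantees a pure digit string, on which ofStr? is some.
def stepA (s : List (Int × Int) × Int × Int × Int) (ukaz : String) :
    List (Int × Int) × Int × Int × Int :=
  let (pot, kx, ky, smer) := s
  if ¬ (PySem.Str.strIsdigit ukaz = true) then
    let smer1 := if ukaz = "DESNO" then smer + 1 else if ukaz = "LEVO" then smer - 1 else smer
    let smer2 := if smer1 > 3 then 0 else smer1
    let smer3 := if smer2 < 0 then 3 else smer2
    (pot, kx, ky, smer3)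
  else
    let st := (PySem.Int.ofStr? ukaz).getD 0
    let p : Int × Int :=
      if smer = 0 then (kx, ky - st)
      else if smer = 1 then (kx + st, ky)
      else if smer = 2 then (kx, ky + st)
      else if smer = 3 then (kx - st, ky)
      else (kx, ky)
    (pot ++ [p], p.1, p.2, smer)

def preberi_pot (ukazi : String) : List (Int × Int) :=
  ((PySem.Str.splitlines ukazi).foldl stepA ([(0, 0)], 0, 0, 0)).1

-- ===== PORT B =====
def turnTable : PySem.Dict String Int := PySem.Dict.ofList [("DESNO", 1), ("LEVO", -1)]

-- stage 1: collect (heading index, amount) for each numeric line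
def stage1 (s : List (Int × Int) × Int) (ukaz : String) : List (Int × Int) × Int :=
  let (moves, h) := s
  if PySem.Str.strIsdigit ukaz = true then
    (moves ++ [(PySem.Int.mod h 4, (PySem.Int.ofStr? ukaz).getD 0)], h)
  else
    (moves, h + PySem.Dict.getD turnTable ukaz 0)

def dirsB : List (Int × Int) := [(0, -1), (1, 0), (0, 1), (-1, 0)]

-- stage 2: one move → one displacement vector (index is always in [0,3], so the default is dead)
def dispOf (m : Int × Int) : Int × Int :=
  let v := PySem.List.pyGetD dirsB m.1 (0, 0)
  (m.2 * v.1, m.2 * v.2)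

-- stage 3: prefix-sum step (pot is never empty, so the pot[-1] default is dead)
def stage3 (pot : List (Int × Int)) (d : Int × Int) : List (Int × Int) :=
  let p := PySem.List.pyGetD pot (-1) ((0 : Int), (0 : Int))
  pot ++ [(p.1 + d.1, p.2 + d.2)]

def preberi_pot_alt (ukazi : String) : List (Int × Int) :=
  let moves := ((PySem.Str.splitlines ukazi).foldl stage1 ([], 0)).1
  let disps := moves.map dispOf
  disps.foldl stage3 [(0, 0)]

-- ===== PRECONDITION & SPEC =====
def Spec_preberi_pot (ukazi : String) (out : List (Int × Int)) : Prop := out = preberi_pot_alt ukazi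
instance (ukazi : String) (out : List (Int × Int)) : Decidable (Spec_preberi_pot ukazi out) := by unfold Spec_preberi_pot; infer_instance

-- ===== CLAIM (what is proved, stated in full; the proofs are below) =====
def Claim_equal_preberi_pot : Prop := ∀ (ukazi : String), Dom_preberi_pot ukazi → Spec_preberi_pot ukazi (preberi_pot ukazi)

-- ===== LEMMAS AND PROOFS =====

-- stage-1 accumulator lemma: the moves list only grows by appending
theorem stage1_acc (lines : List String) (ms : List (Int × Int)) (h : Int) :
    lines.foldl stage1 (ms, h) =
      (ms ++ (lines.foldl stage1 ([], h)).1, (lines.foldl stage1 ([], h)).2) := by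
  induction lines generalizing ms h with
  | nil => simp
  | cons u tl ih =>
    simp only [List.foldl_cons]
    by_cases hd : PySem.Str.strIsdigit u = true
    · have hd' : PySem.Chars.strIsdigit u.toList = true := by
        rwa [PySem.Str.strIsdigit_eq] at hd
      rw [show stage1 (ms, h) u = (ms ++ [(PySem.Int.mod h 4, (PySem.Int.ofStr? u).getD 0)], h) by
          simp [stage1, hd'],
        show stage1 (([] : List (Int × Int)), h) u =
            ([(PySem.Int.mod h 4, (PySem.Int.ofStr? u).getD 0)], h) by simp [stage1, hd']]
      rw [ih, ih [(PySem.Int.mod h 4, (PySem.Int.ofStr? u).getD 0)]]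
      simp
    · have hd' : PySem.Chars.strIsdigit u.toList = false := by
        rw [PySem.Str.strIsdigit_eq] at hd; simpa using hd
      rw [show stage1 (ms, h) u = (ms, h + PySem.Dict.getD turnTable u 0) by simp [stage1, hd'],
        show stage1 (([] : List (Int × Int)), h) u =
            ([], h + PySem.Dict.getD turnTable u 0) by simp [stage1, hd']]
      exact ih ms _

-- main invariant: A's fold from any state equals B's staged computation appended to pot,
-- provided smer is h mod 4 and (kx, ky) is the last point of pot
theorem fold_agree (lines : List String) (pot : List (Int × Int)) (kx ky smer h : Int)
    (hlast : PySem.List.pyGetD pot (-1) ((0 : Int), (0 : Int)) = (kx, ky))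
    (h0 : 0 ≤ smer) (h3 : smer ≤ 3) (hmod : smer = PySem.Int.mod h 4) :
    (lines.foldl stepA (pot, kx, ky, smer)).1 =
      (((lines.foldl stage1 ([], h)).1).map dispOf).foldl stage3 pot := by
  induction lines generalizing pot kx ky smer h with
  | nil => rfl
  | cons u tl ih =>
    have hmod' : smer = h % 4 := by rwa [PySem.Int.mod_eq_emod_of_pos (by norm_num)] at hmod
    simp only [List.foldl_cons]
    by_cases hd : PySem.Str.strIsdigit u = true
    · -- numeric line
      have hd' : PySem.Chars.strIsdigit u.toList = true := by
        rwa [PySem.Str.strIsdigit_eq] at hd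
      obtain ⟨st, hst⟩ : ∃ st : Int, (PySem.Int.ofStr? u).getD 0 = st := ⟨_, rfl⟩
      rw [show stage1 (([] : List (Int × Int)), h) u = ([(PySem.Int.mod h 4, st)], h) by
          simp [stage1, hd', hst]]
      rw [stage1_acc tl [(PySem.Int.mod h 4, st)] h]
      simp only [List.cons_append, List.nil_append, List.map_cons, List.foldl_cons]
      have hm : PySem.Int.mod h 4 = smer := hmod.symm
      have hstage3 : ∀ d : Int × Int, stage3 pot d = pot ++ [(kx + d.1, ky + d.2)] := by
        intro d; simp [stage3, hlast]
      interval_cases smer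
      · rw [show stepA (pot, kx, ky, 0) u = (pot ++ [(kx, ky - st)], kx, ky - st, 0) by
            simp [stepA, hd', hst], hm,
          show dispOf (0, st) = (0, -st) by
            simp [dispOf, dirsB, PySem.List.pyGetD, PySem.List.pyGet?, PySem.List.pyIdx?],
          hstage3]
        rw [show (kx + 0, ky + -st) = (kx, ky - st) by rw [Prod.mk.injEq]; exact ⟨by ring, by ring⟩]
        exact ih (pot ++ [(kx, ky - st)]) kx (ky - st) 0 h
          (by rw [PySem.List.pyGetD_neg_one_append_singleton]) (by norm_num) (by norm_num) hmod
      · rw [show stepA (pot, kx, ky, 1) u = (pot ++ [(kx + st, ky)], kx + st, ky, 1) by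
            simp [stepA, hd', hst], hm,
          show dispOf (1, st) = (st, 0) by
            simp [dispOf, dirsB, PySem.List.pyGetD, PySem.List.pyGet?, PySem.List.pyIdx?],
          hstage3]
        rw [show (kx + st, ky + 0) = (kx + st, ky) by rw [Prod.mk.injEq]; exact ⟨by ring, by ring⟩]
        exact ih (pot ++ [(kx + st, ky)]) (kx + st) ky 1 h
          (by rw [PySem.List.pyGetD_neg_one_append_singleton]) (by norm_num) (by norm_num) hmod
      · rw [show stepA (pot, kx, ky, 2) u = (pot ++ [(kx, ky + st)], kx, ky + st, 2) by
            simp [stepA, hd', hst], hm,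
          show dispOf (2, st) = (0, st) by
            simp [dispOf, dirsB, PySem.List.pyGetD, PySem.List.pyGet?, PySem.List.pyIdx?],
          hstage3]
        rw [show (kx + 0, ky + st) = (kx, ky + st) by rw [Prod.mk.injEq]; exact ⟨by ring, by ring⟩]
        exact ih (pot ++ [(kx, ky + st)]) kx (ky + st) 2 h
          (by rw [PySem.List.pyGetD_neg_one_append_singleton]) (by norm_num) (by norm_num) hmod
      · rw [show stepA (pot, kx, ky, 3) u = (pot ++ [(kx - st, ky)], kx - st, ky, 3) by
            simp [stepA, hd', hst], hm,
          show dispOf (3, st) = (-st, 0) by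
            simp [dispOf, dirsB, PySem.List.pyGetD, PySem.List.pyGet?, PySem.List.pyIdx?],
          hstage3]
        rw [show (kx + -st, ky + 0) = (kx - st, ky) by rw [Prod.mk.injEq]; exact ⟨by ring, by ring⟩]
        exact ih (pot ++ [(kx - st, ky)]) (kx - st) ky 3 h
          (by rw [PySem.List.pyGetD_neg_one_append_singleton]) (by norm_num) (by norm_num) hmod
    · -- non-numeric line: only the heading state changes, identically modulo 4
      have hd' : PySem.Chars.strIsdigit u.toList = false := by
        rw [PySem.Str.strIsdigit_eq] at hd; simpa using hd
      have key : ∀ δ : Int, PySem.Dict.getD turnTable u 0 = δ → (δ = 1 ∨ δ = -1 ∨ δ = 0) →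
          stepA (pot, kx, ky, smer) u = (pot, kx, ky,
            (if (if smer + δ > 3 then 0 else smer + δ) < 0 then 3
             else (if smer + δ > 3 then 0 else smer + δ))) →
          (tl.foldl stepA (stepA (pot, kx, ky, smer) u)).1 =
            (((tl.foldl stage1 (stage1 ([], h) u)).1).map dispOf).foldl stage3 pot := by
        intro δ hget hδv hA
        rw [show stage1 (([] : List (Int × Int)), h) u = ([], h + δ) by simp [stage1, hd', hget]]
        rw [hA]
        have hb1 : 0 ≤ h % 4 := Int.emod_nonneg h (by norm_num)
        have hb2 : h % 4 < 4 := Int.emod_lt_of_pos h (by norm_num)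
        have hb3 : 0 ≤ (h + δ) % 4 := Int.emod_nonneg _ (by norm_num)
        have hb4 : (h + δ) % 4 < 4 := Int.emod_lt_of_pos _ (by norm_num)
        have hmem : (h + δ) % 4 = (h % 4 + δ) % 4 := by
          conv_lhs => rw [show h + δ = h % 4 + δ + 4 * (h / 4) by
            have := Int.emod_add_mul_ediv h 4; omega]
          rw [Int.add_mul_emod_self_left]
        have hw : (if (if smer + δ > 3 then 0 else smer + δ) < 0 then 3
            else (if smer + δ > 3 then 0 else smer + δ)) = (h + δ) % 4 := by
          rcases hδv with rfl | rfl | rfl <;> split_ifs <;> omega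
        rw [hw]
        exact ih pot kx ky _ (h + δ) hlast hb3 (by omega)
          (by rw [PySem.Int.mod_eq_emod_of_pos (by norm_num)])
      by_cases hD : u = "DESNO"
      · subst hD
        have hds : PySem.Chars.strIsdigit ['D','E','S','N','O'] = false := by decide
        exact key 1 (by decide) (Or.inl rfl) (by simp [stepA, hds])
      · by_cases hL : u = "LEVO"
        · subst hL
          have hls : PySem.Chars.strIsdigit ['L','E','V','O'] = false := by decide
          exact key (-1) (by decide) (Or.inr (Or.inl rfl)) (by simp [stepA, hls, sub_eq_add_neg])
        · have hD' : ("DESNO" : String) ≠ u := fun hh => hD hh.symm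
          have hL' : ("LEVO" : String) ≠ u := fun hh => hL hh.symm
          refine key 0 ?_ (Or.inr (Or.inr rfl)) ?_
          · rw [show turnTable = PySem.Dict.mk [("DESNO", (1 : Int)), ("LEVO", -1)] from by decide]
            rw [PySem.Dict.getD_eq_get?_getD, PySem.Dict.get?_mk_cons, PySem.Dict.get?_mk_cons]
            simp [beq_iff_eq, hD', hL', PySem.Dict.get?]
          · have h03 : (if smer + 0 > 3 then (0:Int) else smer + 0) = smer := by
              rw [if_neg (by omega)]; ring
            rw [h03, if_neg (by omega : ¬ smer < 0)]
            simp [stepA, hd', hD, hL]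
            split_ifs <;> omega

-- ===== VERDICT (by name: the statement is the Claim_ definition above) =====
theorem preberi_pot_spec : Claim_equal_preberi_pot := by
  intro ukazi _
  unfold Spec_preberi_pot preberi_pot preberi_pot_alt
  exact fold_agree (PySem.Str.splitlines ukazi) [(0, 0)] 0 0 0 0 (by decide) (by norm_num)
    (by norm_num) (by decide)
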